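-- pv_equiv track=rewrite | github.com/pcw24601/advent-of-code | 2024/08/aoc_2024_08b.py | create_antinodes_one_freq
-- ===== SOURCE A (Python) =====
-- import itertools
--
-- def create_antinodes_one_freq(
--         antennae_positions: set[tuple[int, int]],
--         num_rows: int, num_cols: int
-- ) -> set[tuple[int, int]]:
--     antinodes = set()
--     for (a1_row, a1_col), (a2_row, a2_col) in itertools.combinations(antennae_positions, r=2):
--         multiplier = 0
--         finished = False
--         while not finished:
--             finished = True
--             row_diff = (a1_row - a2_row) * multiplier
--             col_diff = (a1_col - a2_col) * multiplier
--             anode1_row = a1_row + row_diff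
--             anode1_col = a1_col + col_diff
--             anode2_row = a2_row - row_diff
--             anode2_col = a2_col - col_diff
--             if (0 <= anode1_row < num_rows) and (0 <= anode1_col < num_cols):
--                 antinodes.add((anode1_row, anode1_col))
--                 finished = False
--             if (0 <= anode2_row < num_rows) and (0 <= anode2_col < num_cols):
--                 antinodes.add((anode2_row, anode2_col))
--                 finished = False
--             multiplier += 1
--
--     return antinodes
-- ===== SOURCE B (Python) =====
-- import itertools
--
-- def create_antinodes_one_freq(
--         antennae_positions: set[tuple[int, int]],
--         num_rows: int, num_cols: int
-- ) -> set[tuple[int, int]]: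
--     antinodes = set()
--     for (r1, c1), (r2, c2) in itertools.combinations(antennae_positions, r=2):
--         dr, dc = r1 - r2, c1 - c2
--         # FIFO worklist of directed points: each antenna seeds one ray along
--         # the pair's line; a live entry records its cell and re-enqueues the
--         # next cell in its direction, a dead (out-of-grid) entry just drops.
--         work = [(r1, c1, dr, dc), (r2, c2, -dr, -dc)]
--         i = 0
--         while i < len(work):
--             r, c, sr, sc = work[i]
--             i += 1
--             if 0 <= r < num_rows and 0 <= c < num_cols:
--                 antinodes.add((r, c))
--                 work.append((r + sr, c + sc, sr, sc))
--     return antinodes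
-- ===== Notes on version B (the rewrite author's own statement) =====
-- stated objective: alternative
-- what changed: Replaced A's multiplier loop with its shared 'finished' flag and per-iteration difference multiplications by a FIFO worklist of directed points: each antenna of a pair seeds one ray entry, and entries advance themselves independently by incremental stepping until they leave the grid; Pre_ only excludes duplicated in-bounds positions (impossible for a Python set), on which both programs' loops never terminate.
import Mathlib
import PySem

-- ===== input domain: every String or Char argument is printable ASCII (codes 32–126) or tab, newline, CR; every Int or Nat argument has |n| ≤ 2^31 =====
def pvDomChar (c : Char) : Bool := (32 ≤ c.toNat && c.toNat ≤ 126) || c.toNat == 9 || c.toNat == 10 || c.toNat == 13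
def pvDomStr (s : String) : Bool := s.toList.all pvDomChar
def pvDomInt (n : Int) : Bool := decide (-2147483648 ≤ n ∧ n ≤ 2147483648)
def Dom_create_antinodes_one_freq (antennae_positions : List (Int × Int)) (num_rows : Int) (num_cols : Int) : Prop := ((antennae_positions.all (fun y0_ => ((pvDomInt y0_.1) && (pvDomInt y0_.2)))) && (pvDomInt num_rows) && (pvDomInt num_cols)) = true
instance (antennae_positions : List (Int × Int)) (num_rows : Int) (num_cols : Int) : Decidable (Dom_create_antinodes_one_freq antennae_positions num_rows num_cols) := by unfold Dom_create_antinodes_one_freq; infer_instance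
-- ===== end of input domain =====

-- B replaces A's multiplier/shared-flag scan by a FIFO worklist of directed points
-- (each antenna seeds one ray entry that advances itself by incremental stepping);
-- objective: alternative, same cost. Pre_ only excludes duplicated in-bounds
-- positions (impossible for a Python set), where both loops never terminate.

-- ===== PORT A =====
-- 0 <= r < num_rows and 0 <= c < num_cols
def pvInb (nr nc r c : Int) : Bool :=
  decide (0 ≤ r) && decide (r < nr) && decide (0 ≤ c) && decide (c < nc)

-- sufficient fuel for the unbounded Python 'while' loop: with distinct antennae both
-- walked points are out of bounds once the multiplier reaches this value
def pvFuel (nr nc r1 c1 r2 c2 : Int) : Nat :=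
  nr.natAbs + nc.natAbs + r1.natAbs + c1.natAbs + r2.natAbs + c2.natAbs + 2

-- A's 'while not finished' loop for one pair (multiplier m; fueled, fuel is sufficient)
def pvLoopA (nr nc a1r a1c a2r a2c : Int) (s : PySem.Set (Int × Int)) (m : Int) :
    Nat → PySem.Set (Int × Int)
  | 0 => s
  | fuel + 1 =>
    let rowDiff := (a1r - a2r) * m
    let colDiff := (a1c - a2c) * m
    let n1r := a1r + rowDiff
    let n1c := a1c + colDiff
    let n2r := a2r - rowDiff
    let n2c := a2c - colDiff
    let in1 := pvInb nr nc n1r n1c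
    let in2 := pvInb nr nc n2r n2c
    let s1 := if in1 then PySem.Set.add s (n1r, n1c) else s
    let s2 := if in2 then PySem.Set.add s1 (n2r, n2c) else s1
    -- finished stays True iff neither point was in bounds
    if in1 || in2 then pvLoopA nr nc a1r a1c a2r a2c s2 (m + 1) fuel else s2

-- A's loop body for one destructured pair from itertools.combinations
def pvPairA (num_rows num_cols : Int) (s : PySem.Set (Int × Int)) :
    List (Int × Int) → PySem.Set (Int × Int)
  | [a1, a2] =>
    pvLoopA num_rows num_cols a1.1 a1.2 a2.1 a2.2 s 0
      (pvFuel num_rows num_cols a1.1 a1.2 a2.1 a2.2)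
  | _ => s

def create_antinodes_one_freq (antennae_positions : List (Int × Int)) (num_rows : Int) (num_cols : Int) : List (Int × Int) :=
  (PySem.List.combinations antennae_positions 2).foldl
    (pvPairA num_rows num_cols) PySem.Set.empty

-- ===== PORT B =====
-- B's bounds test and fuel bound (B's own copies; not shared with port A)
def pvInbB (nr nc r c : Int) : Bool :=
  decide (0 ≤ r) && decide (r < nr) && decide (0 ≤ c) && decide (c < nc)

def pvFuelB (nr nc r1 c1 r2 c2 : Int) : Nat :=
  nr.natAbs + nc.natAbs + r1.natAbs + c1.natAbs + r2.natAbs + c2.natAbs + 2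

-- B's FIFO worklist loop: an entry is ((row, col, step_row, step_col), fuel); the fuel
-- counter only makes the recursion structural (B's Python while loop has none) and is
-- seeded large enough never to run out on the admitted inputs
def pvWork (nr nc : Int) (s : PySem.Set (Int × Int)) :
    List ((Int × Int × Int × Int) × Nat) → PySem.Set (Int × Int)
  | [] => s
  | ((r, c, sr, sc), fe) :: rest =>
    if pvInbB nr nc r c then
      match fe with
      | 0 => pvWork nr nc s rest
      | fe + 1 => pvWork nr nc (PySem.Set.add s (r, c)) (rest ++ [((r + sr, c + sc, sr, sc), fe)])
    else pvWork nr nc s rest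
termination_by l => (l.map (fun e => e.2 + 1)).sum
decreasing_by all_goals first
  | (simp [List.sum_append]; omega)
  | simp

-- B's body for one destructured pair from itertools.combinations
def pvPairB (num_rows num_cols : Int) (s : PySem.Set (Int × Int)) :
    List (Int × Int) → PySem.Set (Int × Int)
  | [] => s
  | [_] => s
  | a1 :: a2 :: _ =>
    let dr := a1.1 - a2.1
    let dc := a1.2 - a2.2
    let f := pvFuelB num_rows num_cols a1.1 a1.2 a2.1 a2.2
    pvWork num_rows num_cols s
      [((a1.1, a1.2, dr, dc), f), ((a2.1, a2.2, -dr, -dc), f)]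

def create_antinodes_one_freq_alt (antennae_positions : List (Int × Int)) (num_rows : Int) (num_cols : Int) : List (Int × Int) :=
  (PySem.List.combinations antennae_positions 2).foldl
    (pvPairB num_rows num_cols) PySem.Set.empty

-- ===== PRECONDITION & SPEC =====
-- Pre_ excludes a duplicated antenna position lying inside the grid (a Python set can
-- never contain one): there A's while loop (and B's worklist) never terminates.
def Pre_create_antinodes_one_freq (antennae_positions : List (Int × Int)) (num_rows : Int) (num_cols : Int) : Prop :=
  (antennae_positions.filter
    (fun p => decide (0 ≤ p.1 ∧ p.1 < num_rows ∧ 0 ≤ p.2 ∧ p.2 < num_cols))).Nodup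
instance (antennae_positions : List (Int × Int)) (num_rows : Int) (num_cols : Int) : Decidable (Pre_create_antinodes_one_freq antennae_positions num_rows num_cols) := by unfold Pre_create_antinodes_one_freq; infer_instance

def pvWitness_create_antinodes_one_freq : (List (Int × Int)) × Int × Int := ([(0, 0), (1, 2)], 4, 4)

def Spec_create_antinodes_one_freq (antennae_positions : List (Int × Int)) (num_rows : Int) (num_cols : Int) (out : List (Int × Int)) : Prop := out = create_antinodes_one_freq_alt antennae_positions num_rows num_cols
instance (antennae_positions : List (Int × Int)) (num_rows : Int) (num_cols : Int) (out : List (Int × Int)) : Decidable (Spec_create_antinodes_one_freq antennae_positions num_rows num_cols out) := by unfold Spec_create_antinodes_one_freq; infer_instance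

-- ===== CLAIM (what is proved, stated in full; the proofs are below) =====
def Claim_equal_create_antinodes_one_freq : Prop := ∀ (antennae_positions : List (Int × Int)) (num_rows : Int) (num_cols : Int), Dom_create_antinodes_one_freq antennae_positions num_rows num_cols → Pre_create_antinodes_one_freq antennae_positions num_rows num_cols → Spec_create_antinodes_one_freq antennae_positions num_rows num_cols (create_antinodes_one_freq antennae_positions num_rows num_cols)

-- ===== LEMMAS AND PROOFS =====

-- one linear coordinate: the in-bounds parameters form an interval
theorem pvCoordBetween (p d hi t1 t2 t3 : Int) (h12 : t1 ≤ t2) (h23 : t2 ≤ t3)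
    (h1 : 0 ≤ p + t1 * d ∧ p + t1 * d < hi) (h3 : 0 ≤ p + t3 * d ∧ p + t3 * d < hi) :
    0 ≤ p + t2 * d ∧ p + t2 * d < hi := by
  by_cases hd : 0 ≤ d
  · have a1 : (t2 - t1) * d ≥ 0 := mul_nonneg (by omega) hd
    have a2 : (t3 - t2) * d ≥ 0 := mul_nonneg (by omega) hd
    constructor <;> nlinarith
  · have hd' : d ≤ 0 := by omega
    have a1 : (t2 - t1) * d ≤ 0 := mul_nonpos_of_nonneg_of_nonpos (by omega) hd'
    have a2 : (t3 - t2) * d ≤ 0 := mul_nonpos_of_nonneg_of_nonpos (by omega) hd'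
    constructor <;> nlinarith

-- convexity of in-bounds along the line t ↦ (pr + t·dr, pc + t·dc)
theorem pvInbBetween (nr nc pr pc dr dc t1 t2 t3 : Int) (h12 : t1 ≤ t2) (h23 : t2 ≤ t3)
    (h1 : pvInb nr nc (pr + t1 * dr) (pc + t1 * dc) = true)
    (h3 : pvInb nr nc (pr + t3 * dr) (pc + t3 * dc) = true) :
    pvInb nr nc (pr + t2 * dr) (pc + t2 * dc) = true := by
  simp only [pvInb, Bool.and_eq_true, decide_eq_true_eq] at *
  have hr := pvCoordBetween pr dr nr t1 t2 t3 h12 h23 ⟨h1.1.1.1, h1.1.1.2⟩ ⟨h3.1.1.1, h3.1.1.2⟩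
  have hc := pvCoordBetween pc dc nc t1 t2 t3 h12 h23 ⟨h1.1.2, h1.2⟩ ⟨h3.1.2, h3.2⟩
  exact ⟨⟨⟨hr.1, hr.2⟩, hc.1⟩, hc.2⟩

-- the two ports' bounds tests and fuel bounds are definitionally the same
theorem pvInbB_eq (nr nc r c : Int) : pvInbB nr nc r c = pvInb nr nc r c := rfl

theorem pvFuelB_eq (nr nc r1 c1 r2 c2 : Int) :
    pvFuelB nr nc r1 c1 r2 c2 = pvFuel nr nc r1 c1 r2 c2 := rfl

-- side 2 dead: once the a2-side point is out of bounds (and the a1 side keeps the loop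
-- alive), it stays out (pvInbBetween), so A's loop tracks the single a1-side entry
theorem pvLoopA_eq_work_one (nr nc a1r a1c a2r a2c : Int) :
    ∀ (fuel : Nat) (m : Int) (s : PySem.Set (Int × Int)), 0 ≤ m →
      pvInb nr nc (a2r - (a1r - a2r) * m) (a2c - (a1c - a2c) * m) = false →
      pvLoopA nr nc a1r a1c a2r a2c s m fuel =
        pvWork nr nc s
          [((a1r + (a1r - a2r) * m, a1c + (a1c - a2c) * m, a1r - a2r, a1c - a2c), fuel)] := by
  intro fuel
  induction fuel with
  | zero =>
    intro m s hm h2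
    by_cases h1 : pvInb nr nc (a1r + (a1r - a2r) * m) (a1c + (a1c - a2c) * m) = true <;>
      simp [pvLoopA, pvWork, pvInbB_eq, h1]
  | succ fuel ih =>
    intro m s hm h2
    by_cases h1 : pvInb nr nc (a1r + (a1r - a2r) * m) (a1c + (a1c - a2c) * m) = true
    · -- side 1 alive: side 2 stays out at m+1 by convexity
      have h2' : pvInb nr nc (a2r - (a1r - a2r) * (m + 1)) (a2c - (a1c - a2c) * (m + 1)) = false := by
        rw [Bool.eq_false_iff]
        intro hq
        rw [show a2r - (a1r - a2r) * (m + 1) = a1r + (-1 - (m + 1)) * (a1r - a2r) from by ring,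
            show a2c - (a1c - a2c) * (m + 1) = a1c + (-1 - (m + 1)) * (a1c - a2c) from by ring] at hq
        have h1' : pvInb nr nc (a1r + m * (a1r - a2r)) (a1c + m * (a1c - a2c)) = true := by
          rw [show a1r + m * (a1r - a2r) = a1r + (a1r - a2r) * m from by ring,
              show a1c + m * (a1c - a2c) = a1c + (a1c - a2c) * m from by ring]
          exact h1
        have := pvInbBetween nr nc a1r a1c (a1r - a2r) (a1c - a2c)
          (-1 - (m + 1)) (-1 - m) m (by omega) (by omega) hq h1'
        rw [show a1r + (-1 - m) * (a1r - a2r) = a2r - (a1r - a2r) * m from by ring,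
            show a1c + (-1 - m) * (a1c - a2c) = a2c - (a1c - a2c) * m from by ring] at this
        simp [this] at h2
      have e1r : a1r + (a1r - a2r) * m + (a1r - a2r) = a1r + (a1r - a2r) * (m + 1) := by ring
      have e1c : a1c + (a1c - a2c) * m + (a1c - a2c) = a1c + (a1c - a2c) * (m + 1) := by ring
      simp only [pvLoopA, pvWork, pvInbB_eq, h1, h2, if_true, Bool.or_false, List.nil_append, e1r, e1c]
      exact ih (m + 1) _ (by omega) h2'
    · simp [pvLoopA, pvWork, pvInbB_eq, h1, h2]

-- side 1 dead: symmetric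
theorem pvLoopA_eq_work_two (nr nc a1r a1c a2r a2c : Int) :
    ∀ (fuel : Nat) (m : Int) (s : PySem.Set (Int × Int)), 0 ≤ m →
      pvInb nr nc (a1r + (a1r - a2r) * m) (a1c + (a1c - a2c) * m) = false →
      pvLoopA nr nc a1r a1c a2r a2c s m fuel =
        pvWork nr nc s
          [((a2r - (a1r - a2r) * m, a2c - (a1c - a2c) * m, -(a1r - a2r), -(a1c - a2c)), fuel)] := by
  intro fuel
  induction fuel with
  | zero =>
    intro m s hm h1
    by_cases h2 : pvInb nr nc (a2r - (a1r - a2r) * m) (a2c - (a1c - a2c) * m) = true <;>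
      simp [pvLoopA, pvWork, pvInbB_eq, h2]
  | succ fuel ih =>
    intro m s hm h1
    by_cases h2 : pvInb nr nc (a2r - (a1r - a2r) * m) (a2c - (a1c - a2c) * m) = true
    · -- side 2 alive: side 1 stays out at m+1 by convexity
      have h1' : pvInb nr nc (a1r + (a1r - a2r) * (m + 1)) (a1c + (a1c - a2c) * (m + 1)) = false := by
        rw [Bool.eq_false_iff]
        intro hq
        rw [show a1r + (a1r - a2r) * (m + 1) = a1r + (m + 1) * (a1r - a2r) from by ring,
            show a1c + (a1c - a2c) * (m + 1) = a1c + (m + 1) * (a1c - a2c) from by ring] at hq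
        have h2' : pvInb nr nc (a1r + (-1 - m) * (a1r - a2r)) (a1c + (-1 - m) * (a1c - a2c)) = true := by
          rw [show a1r + (-1 - m) * (a1r - a2r) = a2r - (a1r - a2r) * m from by ring,
              show a1c + (-1 - m) * (a1c - a2c) = a2c - (a1c - a2c) * m from by ring]
          exact h2
        have := pvInbBetween nr nc a1r a1c (a1r - a2r) (a1c - a2c)
          (-1 - m) m (m + 1) (by omega) (by omega) h2' hq
        rw [show a1r + m * (a1r - a2r) = a1r + (a1r - a2r) * m from by ring,
            show a1c + m * (a1c - a2c) = a1c + (a1c - a2c) * m from by ring] at this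
        simp [this] at h1
      have e2r : a2r - (a1r - a2r) * m + -(a1r - a2r) = a2r - (a1r - a2r) * (m + 1) := by ring
      have e2c : a2c - (a1c - a2c) * m + -(a1c - a2c) = a2c - (a1c - a2c) * (m + 1) := by ring
      simp only [pvLoopA, pvWork, pvInbB_eq, h1, h2, if_true, Bool.or_true, List.nil_append, e2r, e2c]
      exact ih (m + 1) _ (by omega) h1'
    · simp [pvLoopA, pvWork, pvInbB_eq, h1, h2]

-- the core lemma: A's combined scan at multiplier m equals B's worklist holding the
-- two directed entries at that multiplier, with equal fuel on both sides
theorem pvLoopA_eq_work (nr nc a1r a1c a2r a2c : Int) :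
    ∀ (fuel : Nat) (m : Int) (s : PySem.Set (Int × Int)), 0 ≤ m →
      pvLoopA nr nc a1r a1c a2r a2c s m fuel =
        pvWork nr nc s
          [((a1r + (a1r - a2r) * m, a1c + (a1c - a2c) * m, a1r - a2r, a1c - a2c), fuel),
           ((a2r - (a1r - a2r) * m, a2c - (a1c - a2c) * m, -(a1r - a2r), -(a1c - a2c)), fuel)] := by
  intro fuel
  induction fuel with
  | zero =>
    intro m s hm
    by_cases h1 : pvInb nr nc (a1r + (a1r - a2r) * m) (a1c + (a1c - a2c) * m) = true <;>
      by_cases h2 : pvInb nr nc (a2r - (a1r - a2r) * m) (a2c - (a1c - a2c) * m) = true <;>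
      simp [pvLoopA, pvWork, pvInbB_eq, h1, h2]
  | succ fuel ih =>
    intro m s hm
    have e1r : a1r + (a1r - a2r) * m + (a1r - a2r) = a1r + (a1r - a2r) * (m + 1) := by ring
    have e1c : a1c + (a1c - a2c) * m + (a1c - a2c) = a1c + (a1c - a2c) * (m + 1) := by ring
    have e2r : a2r - (a1r - a2r) * m + -(a1r - a2r) = a2r - (a1r - a2r) * (m + 1) := by ring
    have e2c : a2c - (a1c - a2c) * m + -(a1c - a2c) = a2c - (a1c - a2c) * (m + 1) := by ring
    by_cases h1 : pvInb nr nc (a1r + (a1r - a2r) * m) (a1c + (a1c - a2c) * m) = true <;>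
      by_cases h2 : pvInb nr nc (a2r - (a1r - a2r) * m) (a2c - (a1c - a2c) * m) = true
    · -- both alive: each entry advances once
      simp only [pvLoopA, pvWork, pvInbB_eq, h1, h2, if_true, Bool.or_self,
        List.cons_append, List.nil_append, e1r, e1c, e2r, e2c]
      exact ih (m + 1) _ (by omega)
    · -- entry 2 dies; the loop continues with entry 1 only
      have h2' : pvInb nr nc (a2r - (a1r - a2r) * (m + 1)) (a2c - (a1c - a2c) * (m + 1)) = false := by
        rw [Bool.eq_false_iff]
        intro hq
        rw [show a2r - (a1r - a2r) * (m + 1) = a1r + (-1 - (m + 1)) * (a1r - a2r) from by ring,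
            show a2c - (a1c - a2c) * (m + 1) = a1c + (-1 - (m + 1)) * (a1c - a2c) from by ring] at hq
        have h1' : pvInb nr nc (a1r + m * (a1r - a2r)) (a1c + m * (a1c - a2c)) = true := by
          rw [show a1r + m * (a1r - a2r) = a1r + (a1r - a2r) * m from by ring,
              show a1c + m * (a1c - a2c) = a1c + (a1c - a2c) * m from by ring]
          exact h1
        have := pvInbBetween nr nc a1r a1c (a1r - a2r) (a1c - a2c)
          (-1 - (m + 1)) (-1 - m) m (by omega) (by omega) hq h1'
        rw [show a1r + (-1 - m) * (a1r - a2r) = a2r - (a1r - a2r) * m from by ring,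
            show a1c + (-1 - m) * (a1c - a2c) = a2c - (a1c - a2c) * m from by ring] at this
        simp [this] at h2
      simp only [pvLoopA, pvWork, pvInbB_eq, h1, h2, if_true, Bool.or_false, List.cons_append, List.nil_append, e1r, e1c]
      exact pvLoopA_eq_work_one nr nc a1r a1c a2r a2c fuel (m + 1) _ (by omega) h2'
    · -- entry 1 dies; the loop continues with entry 2 only
      have h1' : pvInb nr nc (a1r + (a1r - a2r) * (m + 1)) (a1c + (a1c - a2c) * (m + 1)) = false := by
        rw [Bool.eq_false_iff]
        intro hq
        rw [show a1r + (a1r - a2r) * (m + 1) = a1r + (m + 1) * (a1r - a2r) from by ring,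
            show a1c + (a1c - a2c) * (m + 1) = a1c + (m + 1) * (a1c - a2c) from by ring] at hq
        have h2' : pvInb nr nc (a1r + (-1 - m) * (a1r - a2r)) (a1c + (-1 - m) * (a1c - a2c)) = true := by
          rw [show a1r + (-1 - m) * (a1r - a2r) = a2r - (a1r - a2r) * m from by ring,
              show a1c + (-1 - m) * (a1c - a2c) = a2c - (a1c - a2c) * m from by ring]
          exact h2
        have := pvInbBetween nr nc a1r a1c (a1r - a2r) (a1c - a2c)
          (-1 - m) m (m + 1) (by omega) (by omega) h2' hq
        rw [show a1r + m * (a1r - a2r) = a1r + (a1r - a2r) * m from by ring,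
            show a1c + m * (a1c - a2c) = a1c + (a1c - a2c) * m from by ring] at this
        simp [this] at h1
      simp only [pvLoopA, pvWork, pvInbB_eq, h1, h2, if_true, Bool.or_true, List.cons_append, List.nil_append, e2r, e2c]
      exact pvLoopA_eq_work_two nr nc a1r a1c a2r a2c fuel (m + 1) _ (by omega) h1'
    · -- both out: A stops; both entries drop
      simp [pvLoopA, pvWork, pvInbB_eq, h1, h2]

-- per-pair agreement (multiplier 0 = the two antennae themselves)
theorem pvPair_eq (nr nc a1r a1c a2r a2c : Int) (s : PySem.Set (Int × Int)) :
    pvLoopA nr nc a1r a1c a2r a2c s 0 (pvFuel nr nc a1r a1c a2r a2c) =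
      pvWork nr nc s
        [((a1r, a1c, a1r - a2r, a1c - a2c), pvFuel nr nc a1r a1c a2r a2c),
         ((a2r, a2c, -(a1r - a2r), -(a1c - a2c)), pvFuel nr nc a1r a1c a2r a2c)] := by
  have h := pvLoopA_eq_work nr nc a1r a1c a2r a2c (pvFuel nr nc a1r a1c a2r a2c) 0 s (by omega)
  simpa using h

-- ===== VERDICT (by name: the statement is the Claim_ definition above) =====
theorem create_antinodes_one_freq_spec : Claim_equal_create_antinodes_one_freq := by
  intro aps nr nc _ _
  unfold Spec_create_antinodes_one_freq create_antinodes_one_freq create_antinodes_one_freq_alt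
  apply PySem.List.foldl_congr_mem
  intro s pair hmem
  have hlen : pair.length = 2 := PySem.List.length_of_mem_combinations hmem
  match pair, hlen with
  | [a1, a2], _ =>
    simpa [pvPairA, pvPairB, pvFuelB_eq] using pvPair_eq nr nc a1.1 a1.2 a2.1 a2.2 s
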